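-- pv_equiv track=rewrite | github.com/akleemans/aoc-2023 | day22.py | has_collision
-- ===== SOURCE A (Python) =====
-- def has_collision(new_brick, bricks, ignore_brick):
--     for i, brick in enumerate(bricks):
--         if i == ignore_brick:
--             continue
--         for coord in new_brick:
--             if coord in brick:
--                 return True
--     return False
-- ===== SOURCE B (Python) =====
-- def has_collision(new_brick, bricks, ignore_brick):
--     occupied = set()
--     for i, brick in enumerate(bricks):
--         if i != ignore_brick:
--             occupied.update(brick)
--     return not occupied.isdisjoint(new_brick)
-- ===== Notes on version B (the rewrite author's own statement) =====
-- stated objective: faster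
-- what changed: Replaces the nested short-circuiting per-brick list-membership scan with a build-then-test shape: one pass builds a combined occupancy hash set of all non-ignored bricks, then a single set-disjointness test against new_brick gives the answer.
import Mathlib
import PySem

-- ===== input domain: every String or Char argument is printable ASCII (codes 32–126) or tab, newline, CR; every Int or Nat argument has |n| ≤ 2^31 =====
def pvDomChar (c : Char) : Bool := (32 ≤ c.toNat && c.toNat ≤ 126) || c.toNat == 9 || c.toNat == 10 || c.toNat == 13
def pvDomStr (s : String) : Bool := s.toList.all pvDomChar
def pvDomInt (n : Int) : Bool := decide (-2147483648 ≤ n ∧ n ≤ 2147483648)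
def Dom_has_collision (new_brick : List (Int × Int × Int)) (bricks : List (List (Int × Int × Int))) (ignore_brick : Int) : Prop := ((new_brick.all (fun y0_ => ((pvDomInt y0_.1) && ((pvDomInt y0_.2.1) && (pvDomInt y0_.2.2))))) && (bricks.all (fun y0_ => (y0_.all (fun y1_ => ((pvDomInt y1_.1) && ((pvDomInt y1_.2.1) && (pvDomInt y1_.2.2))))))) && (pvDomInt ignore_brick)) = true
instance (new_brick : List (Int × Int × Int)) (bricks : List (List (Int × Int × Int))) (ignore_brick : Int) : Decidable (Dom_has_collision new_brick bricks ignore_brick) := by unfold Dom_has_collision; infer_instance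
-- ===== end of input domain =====

-- B replaces A's nested short-circuiting per-brick scan by building one combined occupancy
-- hash set of all non-ignored bricks and then doing a single set-disjointness test (objective: faster).

-- ===== PORT A =====
-- A's outer 'for i, brick in enumerate(bricks)' loop with early return; the inner
-- 'for coord in new_brick: if coord in brick: return True' is the List.any over new_brick.
def hcA_loop (new_brick : List (Int × Int × Int)) (ignore_brick : Int) :
    List (Int × List (Int × Int × Int)) → Bool
  | [] => false
  | (i, brick) :: rest =>
    if i == ignore_brick then hcA_loop new_brick ignore_brick rest
    else if new_brick.any (fun coord => brick.contains coord) then true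
    else hcA_loop new_brick ignore_brick rest

def has_collision (new_brick : List (Int × Int × Int)) (bricks : List (List (Int × Int × Int))) (ignore_brick : Int) : Bool :=
  hcA_loop new_brick ignore_brick (PySem.List.enumerate bricks)

-- ===== PORT B =====
def has_collision_alt (new_brick : List (Int × Int × Int)) (bricks : List (List (Int × Int × Int))) (ignore_brick : Int) : Bool :=
  let occupied : PySem.Set (Int × Int × Int) :=
    (PySem.List.enumerate bricks).foldl
      (fun occ p => if p.1 != ignore_brick then PySem.Set.update occ p.2 else occ)
      PySem.Set.empty
  !(PySem.Set.isdisjoint occupied new_brick)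

-- ===== PRECONDITION & SPEC =====
def Spec_has_collision (new_brick : List (Int × Int × Int)) (bricks : List (List (Int × Int × Int))) (ignore_brick : Int) (out : Bool) : Prop := out = has_collision_alt new_brick bricks ignore_brick
instance (new_brick : List (Int × Int × Int)) (bricks : List (List (Int × Int × Int))) (ignore_brick : Int) (out : Bool) : Decidable (Spec_has_collision new_brick bricks ignore_brick out) := by unfold Spec_has_collision; infer_instance

-- ===== CLAIM (what is proved, stated in full; the proofs are below) =====
def Claim_equal_has_collision : Prop := ∀ (new_brick : List (Int × Int × Int)) (bricks : List (List (Int × Int × Int))) (ignore_brick : Int), Dom_has_collision new_brick bricks ignore_brick → Spec_has_collision new_brick bricks ignore_brick (has_collision new_brick bricks ignore_brick)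

-- ===== LEMMAS AND PROOFS =====

-- A's loop returns true iff some non-ignored enumerated brick shares a coordinate with new_brick.
lemma hcA_loop_iff (new_brick : List (Int × Int × Int)) (ignore_brick : Int)
    (pairs : List (Int × List (Int × Int × Int))) :
    hcA_loop new_brick ignore_brick pairs = true ↔
      ∃ p ∈ pairs, p.1 ≠ ignore_brick ∧ ∃ c ∈ new_brick, c ∈ p.2 := by
  induction pairs with
  | nil => simp [hcA_loop]
  | cons hd tl ih =>
    obtain ⟨i, brick⟩ := hd
    by_cases hi : i = ignore_brick
    · simp [hcA_loop, hi, ih]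
    · rw [show hcA_loop new_brick ignore_brick ((i, brick) :: tl)
            = (if i == ignore_brick then hcA_loop new_brick ignore_brick tl
               else if new_brick.any (fun coord => brick.contains coord) then true
               else hcA_loop new_brick ignore_brick tl) from rfl,
          if_neg (by simpa using hi)]
      by_cases hany : new_brick.any (fun coord => brick.contains coord) = true
      · rw [if_pos hany]
        simp only [List.any_eq_true, List.contains_iff_mem] at hany
        obtain ⟨c, hc, hcb⟩ := hany
        simp only [true_iff, List.mem_cons]
        exact ⟨(i, brick), Or.inl rfl, hi, c, hc, hcb⟩
      · rw [if_neg hany, ih]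
        simp only [List.any_eq_true, List.contains_iff_mem] at hany
        constructor
        · rintro ⟨p, hp, h1, h2⟩; exact ⟨p, List.mem_cons_of_mem _ hp, h1, h2⟩
        · rintro ⟨p, hp, h1, c, hc, hcb⟩
          rcases List.mem_cons.mp hp with h | h
          · exact absurd ⟨c, hc, by rw [h] at hcb; exact hcb⟩ hany
          · exact ⟨p, h, h1, c, hc, hcb⟩

-- membership in B's accumulated occupancy set
lemma occ_mem (ignore_brick : Int) (pairs : List (Int × List (Int × Int × Int)))
    (occ : PySem.Set (Int × Int × Int)) (c : Int × Int × Int) :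
    c ∈ pairs.foldl
        (fun occ p => if p.1 != ignore_brick then PySem.Set.update occ p.2 else occ) occ ↔
      c ∈ occ ∨ ∃ p ∈ pairs, p.1 ≠ ignore_brick ∧ c ∈ p.2 := by
  induction pairs generalizing occ with
  | nil => simp
  | cons hd tl ih =>
    obtain ⟨i, brick⟩ := hd
    rw [List.foldl_cons, ih]
    by_cases hi : i = ignore_brick
    · rw [if_neg (by simpa using hi)]
      simp only [List.mem_cons]
      constructor
      · rintro (h | ⟨p, hp, h1, h2⟩)
        · exact Or.inl h
        · exact Or.inr ⟨p, Or.inr hp, h1, h2⟩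
      · rintro (h | ⟨p, hp | hp, h1, h2⟩)
        · exact Or.inl h
        · exact absurd (by rw [hp] at h1 ⊢; exact hi) h1
        · exact Or.inr ⟨p, hp, h1, h2⟩
    · rw [if_pos (by simpa using hi)]
      simp only [PySem.Set.mem_update, List.mem_cons]
      constructor
      · rintro (⟨h | h⟩ | ⟨p, hp, h1, h2⟩)
        · exact Or.inl h
        · exact Or.inr ⟨(i, brick), Or.inl rfl, hi, h⟩
        · exact Or.inr ⟨p, Or.inr hp, h1, h2⟩
      · rintro (h | ⟨p, hp | hp, h1, h2⟩)
        · exact Or.inl (Or.inl h)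
        · subst hp; exact Or.inl (Or.inr h2)
        · exact Or.inr ⟨p, hp, h1, h2⟩

lemma hc_iff_alt (new_brick : List (Int × Int × Int)) (bricks : List (List (Int × Int × Int))) (ignore_brick : Int) :
    has_collision new_brick bricks ignore_brick = has_collision_alt new_brick bricks ignore_brick := by
  rw [Bool.eq_iff_iff]
  unfold has_collision has_collision_alt
  rw [hcA_loop_iff]
  simp only [PySem.Set.isdisjoint, PySem.Set.contains_eq_listContains, Bool.not_not,
    List.any_eq_true, List.contains_iff_mem, occ_mem]
  constructor
  · rintro ⟨p, hp, h1, c, hc, hcb⟩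
    exact ⟨c, Or.inr ⟨p, hp, h1, hcb⟩, hc⟩
  · rintro ⟨c, hc, hnb⟩
    rcases hc with h | ⟨p, hp, h1, h2⟩
    · simp [PySem.Set.empty] at h
    · exact ⟨p, hp, h1, c, hnb, h2⟩

-- ===== VERDICT (by name: the statement is the Claim_ definition above) =====
theorem has_collision_spec : Claim_equal_has_collision := by
  intro nb bricks ig _
  exact hc_iff_alt nb bricks ig
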